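-- pv_equiv track=rewrite | github.com/autorom2024/VoikanRecords | ui/pages/tab_autofill.py | trim_tags_for_youtube
-- ===== SOURCE A (Python) =====
-- def trim_tags_for_youtube(tags):
--     if not tags: return []
--     out, seen, total = [], set(), 0
--     for t in tags:
--         clean = (" ".join(str(t).split())).strip(",;# ")
--         if not clean: continue
--         key = clean.lower()
--         if key in seen: continue
--         add_len = len(clean) + (1 if out else 0)
--         if total + add_len > 480: break
--         out.append(clean); seen.add(key); total += add_len
--         if len(out) >= 30: break
--     return out
-- ===== SOURCE B (Python) =====
-- def trim_tags_for_youtube(tags):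
--     # pass 1: normalize and dedupe (first occurrence, case-insensitive)
--     cleaned, seen = [], set()
--     for t in tags:
--         c = (" ".join(str(t).split())).strip(",;# ")
--         k = c.lower()
--         if c and k not in seen:
--             cleaned.append(c)
--             seen.add(k)
--     # pass 2: take the longest prefix within the 480-char / 30-tag budget
--     result, total = [], 0
--     for c in cleaned:
--         cost = len(c) + (1 if result else 0)
--         if total + cost > 480 or len(result) >= 30:
--             break
--         result.append(c)
--         total += cost
--     return result
-- ===== Notes on version B (the rewrite author's own statement) =====
-- stated objective: simpler
-- what changed: Split A's single break-laden loop into two passes: a normalize/dedupe fold over all tags, then a separate budget scan that takes the longest prefix fitting the 480-char/30-tag limits (check-before-append instead of A's append-then-check and mid-loop breaks).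
import Mathlib
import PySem

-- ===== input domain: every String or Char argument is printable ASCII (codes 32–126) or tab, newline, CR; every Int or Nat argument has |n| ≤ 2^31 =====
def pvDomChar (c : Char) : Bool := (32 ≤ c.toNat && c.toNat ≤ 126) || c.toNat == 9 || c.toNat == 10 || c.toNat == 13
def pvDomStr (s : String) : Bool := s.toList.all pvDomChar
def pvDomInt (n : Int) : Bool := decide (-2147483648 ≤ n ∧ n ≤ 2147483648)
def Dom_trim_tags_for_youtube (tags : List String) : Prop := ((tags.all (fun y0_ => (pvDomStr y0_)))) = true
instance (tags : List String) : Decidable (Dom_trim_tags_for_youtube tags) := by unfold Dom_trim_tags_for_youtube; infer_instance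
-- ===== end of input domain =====

-- B replaces A's single break-laden loop by a normalize/dedupe pass followed by a separate
-- prefix-budget scan (objective: simpler decomposition; same asymptotic cost).

-- clean = (" ".join(str(t).split())).strip(",;# ")  — shared normalization expression of both Pythons
def pvClean (t : String) : String :=
  PySem.Str.stripChars (PySem.Str.join " " (PySem.Str.split₀ t)) ",;# "

-- ===== PORT A =====
-- A's for-loop with its continue/break structure, as a recursion over the tag list
def pvLoopA : List String → List String → PySem.Set String → Int → List String
  | [], out, _, _ => out
  | t :: rest, out, seen, total =>
    let clean := pvClean t
    if clean = "" then pvLoopA rest out seen total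
    else
      let key := PySem.Str.lower clean
      if PySem.Set.contains seen key then pvLoopA rest out seen total
      else
        let addLen := PySem.Str.len clean + (if out.isEmpty then 0 else 1)
        if total + addLen > 480 then out
        else
          let out' := out ++ [clean]
          if 30 ≤ out'.length then out'
          else pvLoopA rest out' (PySem.Set.add seen key) (total + addLen)

def trim_tags_for_youtube (tags : List String) : List String :=
  if tags.isEmpty then [] else pvLoopA tags [] PySem.Set.empty 0

-- ===== PORT B =====
-- pass 1 of Source B: normalize and dedupe (first occurrence, case-insensitive), an append fold
def pvPass1 (tags : List String) : List String :=
  (tags.foldl (fun (acc : List String × PySem.Set String) t =>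
    let c := pvClean t
    let k := PySem.Str.lower c
    if c ≠ "" ∧ ¬ PySem.Set.contains acc.2 k then (acc.1 ++ [c], PySem.Set.add acc.2 k) else acc)
    ([], PySem.Set.empty)).1

-- pass 2 of Source B: longest prefix within the 480-char / 30-tag budget (break = stop recursing)
def pvPass2 : List String → List String → Int → List String
  | [], res, _ => res
  | c :: rest, res, total =>
    let cost := PySem.Str.len c + (if res.isEmpty then 0 else 1)
    if total + cost > 480 ∨ 30 ≤ res.length then res
    else pvPass2 rest (res ++ [c]) (total + cost)

def trim_tags_for_youtube_alt (tags : List String) : List String :=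
  pvPass2 (pvPass1 tags) [] 0

-- ===== PRECONDITION & SPEC =====
def Spec_trim_tags_for_youtube (tags : List String) (out : List String) : Prop := out = trim_tags_for_youtube_alt tags
instance (tags : List String) (out : List String) : Decidable (Spec_trim_tags_for_youtube tags out) := by unfold Spec_trim_tags_for_youtube; infer_instance

-- ===== CLAIM (what is proved, stated in full; the proofs are below) =====
def Claim_equal_trim_tags_for_youtube : Prop := ∀ (tags : List String), Dom_trim_tags_for_youtube tags → Spec_trim_tags_for_youtube tags (trim_tags_for_youtube tags)

-- ===== LEMMAS AND PROOFS =====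

-- pass 1 written as a plain recursion (proof helper)
def pvPass1Rec : List String → PySem.Set String → List String
  | [], _ => []
  | t :: rest, seen =>
    let c := pvClean t
    let k := PySem.Str.lower c
    if c ≠ "" ∧ ¬ PySem.Set.contains seen k then c :: pvPass1Rec rest (PySem.Set.add seen k)
    else pvPass1Rec rest seen

lemma pvPass1_foldl_eq (tags : List String) :
    ∀ (acc : List String) (seen : PySem.Set String),
    (tags.foldl (fun (acc : List String × PySem.Set String) t =>
      let c := pvClean t
      let k := PySem.Str.lower c
      if c ≠ "" ∧ ¬ PySem.Set.contains acc.2 k then (acc.1 ++ [c], PySem.Set.add acc.2 k) else acc)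
      (acc, seen)).1 = acc ++ pvPass1Rec tags seen := by
  induction tags with
  | nil => intro acc seen; simp [pvPass1Rec]
  | cons t rest ih =>
    intro acc seen
    rw [List.foldl_cons]
    by_cases h : pvClean t ≠ "" ∧ ¬ PySem.Set.contains seen (PySem.Str.lower (pvClean t))
    · simp only [pvPass1Rec, if_pos h, ih, List.append_assoc, List.singleton_append]
    · simp only [pvPass1Rec, if_neg h, ih]

lemma pvPass1_eq (tags : List String) : pvPass1 tags = pvPass1Rec tags PySem.Set.empty := by
  simpa [pvPass1] using pvPass1_foldl_eq tags [] PySem.Set.empty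

lemma pvPass2_full (l : List String) (res : List String) (total : Int) (h : 30 ≤ res.length) :
    pvPass2 l res total = res := by
  cases l with
  | nil => rfl
  | cons c rest => simp [pvPass2, h]

lemma pvLoopA_eq_pass2 (tags : List String) :
    ∀ (out : List String) (seen : PySem.Set String) (total : Int), out.length < 30 →
    pvLoopA tags out seen total = pvPass2 (pvPass1Rec tags seen) out total := by
  induction tags with
  | nil => intro out seen total _; rfl
  | cons t rest ih =>
    intro out seen total hlen
    simp only [pvLoopA, pvPass1Rec]
    by_cases hempty : pvClean t = ""
    · have hcond : ¬ (pvClean t ≠ "" ∧ ¬ PySem.Set.contains seen (PySem.Str.lower (pvClean t))) :=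
        fun h' => h'.1 hempty
      rw [if_pos hempty, if_neg hcond]
      exact ih out seen total hlen
    · rw [if_neg hempty]
      by_cases hseen : PySem.Set.contains seen (PySem.Str.lower (pvClean t))
      · have hcond : ¬ (pvClean t ≠ "" ∧ ¬ PySem.Set.contains seen (PySem.Str.lower (pvClean t))) :=
          fun h' => h'.2 hseen
        rw [if_pos hseen, if_neg hcond]
        exact ih out seen total hlen
      · have hcond : pvClean t ≠ "" ∧ ¬ PySem.Set.contains seen (PySem.Str.lower (pvClean t)) :=
          ⟨hempty, hseen⟩
        rw [if_neg hseen, if_pos hcond]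
        simp only [pvPass2]
        by_cases hover : total + (PySem.Str.len (pvClean t) + (if out.isEmpty then 0 else 1)) > 480
        · rw [if_pos hover, if_pos (Or.inl hover)]
        · have hnot : ¬ (total + (PySem.Str.len (pvClean t) + (if out.isEmpty then 0 else 1)) > 480
              ∨ 30 ≤ out.length) :=
            fun hor => hor.elim hover (fun h30 => absurd hlen (Nat.not_lt.mpr h30))
          rw [if_neg hover, if_neg hnot]
          by_cases hfull : 30 ≤ (out ++ [pvClean t]).length
          · rw [if_pos hfull, pvPass2_full _ _ _ hfull]
          · rw [if_neg hfull]
            exact ih _ _ _ (Nat.lt_of_not_le hfull)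

-- ===== VERDICT (by name: the statement is the Claim_ definition above) =====
theorem trim_tags_for_youtube_spec : Claim_equal_trim_tags_for_youtube := by
  intro tags _
  unfold Spec_trim_tags_for_youtube trim_tags_for_youtube trim_tags_for_youtube_alt
  rw [pvPass1_eq]
  by_cases h : tags.isEmpty
  · rw [if_pos h]
    cases tags with
    | nil => rfl
    | cons a l => simp at h
  · rw [if_neg h]
    exact pvLoopA_eq_pass2 tags [] PySem.Set.empty 0 (by simp)
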